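-- pv_equiv track=rewrite | github.com/naturallanguagepuzzling/blog | 2021-01-31-state_borders_scrambled.py | compare_for_solutions
-- ===== SOURCE A (Python) =====
-- def string_to_sorted_string(some_string):
--     some_string = list(some_string)
--     some_string.sort()
--     some_string = "".join(some_string)
--     return some_string
--
-- def compare_for_solutions(lex, cdict):
--     solutions = []
--     for c in cdict:
--         for l in lex:
--             ls = string_to_sorted_string(l)
--             if c == ls:
--                 solutions.append(l+" "+cdict[c])
--     solutions.sort()
--     return(solutions)
-- ===== SOURCE B (Python) =====
-- def compare_for_solutions(lex, cdict):
--     index = {}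
--     for k, w in ((''.join(sorted(l)), l) for l in lex):
--         index[k] = index.get(k, []) + [w]
--     solutions = [w + " " + v for k, v in cdict.items() for w in index.get(k, [])]
--     solutions.sort()
--     return solutions
-- ===== Notes on version B (the rewrite author's own statement) =====
-- stated objective: faster
-- what changed: B first groups the words of lex into a hash index keyed by their sorted letters, then iterates cdict's items once, emitting the indexed words for each key, so the nested cdict-keys x lex scan with per-pair re-sorting disappears.
import Mathlib
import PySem

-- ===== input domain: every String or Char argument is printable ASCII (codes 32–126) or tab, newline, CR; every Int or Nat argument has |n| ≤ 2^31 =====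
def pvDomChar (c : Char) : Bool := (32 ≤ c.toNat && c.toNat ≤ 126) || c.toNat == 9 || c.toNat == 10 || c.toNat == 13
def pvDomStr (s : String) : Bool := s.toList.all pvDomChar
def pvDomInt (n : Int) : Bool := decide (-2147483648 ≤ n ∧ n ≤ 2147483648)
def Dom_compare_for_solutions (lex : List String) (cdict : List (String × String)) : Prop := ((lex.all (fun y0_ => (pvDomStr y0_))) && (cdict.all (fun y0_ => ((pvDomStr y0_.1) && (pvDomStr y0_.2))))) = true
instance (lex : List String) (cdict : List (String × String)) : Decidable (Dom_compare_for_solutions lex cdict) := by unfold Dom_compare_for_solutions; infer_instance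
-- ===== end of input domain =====

-- B groups lex once into a hash index keyed by sorted letters and then walks cdict's items once,
-- replacing A's nested cdict-keys × lex scan; return values proved equal.

-- ===== PORT A =====
-- sorted(list(s)) joined back to a string
def string_to_sorted_string (some_string : String) : String :=
  String.ofList (PySem.List.sorted some_string.toList (fun c => c) false)

def compare_for_solutions (lex : List String) (cdict : List (String × String)) : List String :=
  let d := PySem.Dict.ofList cdict        -- the Python argument is a dict; assoc list → dict
  let solutions := d.keys.foldl (fun sols c =>
    lex.foldl (fun sols l =>
      let ls := string_to_sorted_string l
      if c == ls then sols ++ [l ++ " " ++ d.getD c ""] else sols) sols) []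
  -- cdict[c] with c drawn from cdict's keys never raises, so getD is exact here
  PySem.List.sorted solutions (fun x => x) false

-- ===== PORT B =====
def compare_for_solutions_alt (lex : List String) (cdict : List (String × String)) : List String :=
  let d := PySem.Dict.ofList cdict
  -- for k, w in ((sorted-letters(l), l) for l in lex): index[k] = index.get(k, []) + [w]
  let index := (lex.map (fun l => (string_to_sorted_string l, l))).foldl
      (fun idx p => idx.modify p.1 [] (· ++ [p.2])) PySem.Dict.empty
  -- [w + " " + v for k, v in cdict.items() for w in index.get(k, [])]
  let solutions := d.items.flatMap (fun p => (index.getD p.1 []).map (fun w => w ++ " " ++ p.2))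
  PySem.List.sorted solutions (fun x => x) false

-- ===== PRECONDITION & SPEC =====
def Spec_compare_for_solutions (lex : List String) (cdict : List (String × String)) (out : List String) : Prop := out = compare_for_solutions_alt lex cdict
instance (lex : List String) (cdict : List (String × String)) (out : List String) : Decidable (Spec_compare_for_solutions lex cdict out) := by unfold Spec_compare_for_solutions; infer_instance

-- ===== CLAIM =====
def Claim_equal_compare_for_solutions : Prop := ∀ (lex : List String) (cdict : List (String × String)), Dom_compare_for_solutions lex cdict → Spec_compare_for_solutions lex cdict (compare_for_solutions lex cdict)

-- ===== LEMMAS AND PROOFS =====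

-- A's outer loop over the dict keys as flatMap of its inner filter-and-map loop
theorem outerA_eq (d : PySem.Dict String String) (lex : List String) (ks : List String)
    (init : List String) :
    ks.foldl (fun sols c =>
      lex.foldl (fun sols l =>
        let ls := string_to_sorted_string l
        if c == ls then sols ++ [l ++ " " ++ d.getD c ""] else sols) sols) init
    = init ++ ks.flatMap (fun c =>
        (lex.filter (fun l => c == string_to_sorted_string l)).map (fun l => l ++ " " ++ d.getD c "")) := by
  induction ks generalizing init with
  | nil => simp
  | cons c ks ih =>
    rw [List.foldl_cons, PySem.List.foldl_append_if
      (p := fun l => c == string_to_sorted_string l)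
      (f := fun l => l ++ " " ++ d.getD c ""), ih]
    simp [List.flatMap_cons]

-- B's index lookup is exactly A's inner filter over lex
theorem index_getD_eq (lex : List String) (k : String) :
    ((lex.map (fun l => (string_to_sorted_string l, l))).foldl
      (fun idx p => idx.modify p.1 [] (· ++ [p.2])) PySem.Dict.empty).getD k []
    = lex.filter (fun l => k == string_to_sorted_string l) := by
  rw [PySem.Dict.getD_foldl_modify_append, PySem.Dict.getD_empty, List.nil_append,
    List.filter_map, List.map_map]
  simp only [Function.comp_def]
  rw [show (fun l => ((string_to_sorted_string l, l) : String × String).1 == k)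
      = fun l => k == string_to_sorted_string l from funext fun l => by simp [eq_comm]]
  simp

-- the two pre-sort accumulators are the same list
theorem presort_eq (lex : List String) (cdict : List (String × String)) :
    ((PySem.Dict.ofList cdict).keys.foldl (fun sols c =>
      lex.foldl (fun sols l =>
        let ls := string_to_sorted_string l
        if c == ls then sols ++ [l ++ " " ++ (PySem.Dict.ofList cdict).getD c ""] else sols) sols) [])
    = (PySem.Dict.ofList cdict).items.flatMap (fun p =>
        (((lex.map (fun l => (string_to_sorted_string l, l))).foldl
          (fun idx p => idx.modify p.1 [] (· ++ [p.2])) PySem.Dict.empty).getD p.1 []).map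
          (fun w => w ++ " " ++ p.2)) := by
  rw [outerA_eq, List.nil_append,
    PySem.Dict.items_eq_map_keys (PySem.Dict.ofList cdict) (PySem.Dict.nodup_keys_ofList cdict) "",
    List.flatMap_map]
  apply List.flatMap_congr
  intro c _
  rw [index_getD_eq]

-- ===== VERDICT =====
theorem compare_for_solutions_spec : Claim_equal_compare_for_solutions := by
  intro lex cdict _
  unfold Spec_compare_for_solutions compare_for_solutions compare_for_solutions_alt
  dsimp only
  rw [presort_eq]
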